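-- pv_equiv track=rewrite | github.com/OhadLibai/Basic_Programing_Concepts | task_2_Py/task_2.py | leq
-- ===== SOURCE A (Python) =====
-- def leq(bin1, bin2):
--     if bin2==bin1:
--         return True
--     elif len(bin2)>len(bin1):
--         return True
--     elif len(bin1)>len(bin2):
--         return False
--     i=0
--     while bin2[i]>=bin1[i]:
--         if bin2[i]=="1" and bin1[i]=="0":
--             return True
--         i+=1
--
--     return False
-- ===== SOURCE B (Python) =====
-- def leq(bin1, bin2):
--     if len(bin1) != len(bin2):
--         return len(bin1) < len(bin2)
--     v1 = v2 = 0
--     for c1, c2 in zip(bin1, bin2):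
--         v1 = 2 * v1 + (c1 == '1')
--         v2 = 2 * v2 + (c2 == '1')
--     return v1 <= v2
-- ===== Notes on version B (the rewrite author's own statement) =====
-- stated objective: alternative
-- what changed: B interprets the equal-length strings as binary numbers (one full zip pass folding v=2*v+bit, no early exit) and compares the two integer values after a length-first test, instead of A's early-exit character scan with the bin2[i]>=bin1[i] guard.
-- outside the precondition, e.g. on leq('ba', 'ab'): A returns False, B returns True
import Mathlib
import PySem

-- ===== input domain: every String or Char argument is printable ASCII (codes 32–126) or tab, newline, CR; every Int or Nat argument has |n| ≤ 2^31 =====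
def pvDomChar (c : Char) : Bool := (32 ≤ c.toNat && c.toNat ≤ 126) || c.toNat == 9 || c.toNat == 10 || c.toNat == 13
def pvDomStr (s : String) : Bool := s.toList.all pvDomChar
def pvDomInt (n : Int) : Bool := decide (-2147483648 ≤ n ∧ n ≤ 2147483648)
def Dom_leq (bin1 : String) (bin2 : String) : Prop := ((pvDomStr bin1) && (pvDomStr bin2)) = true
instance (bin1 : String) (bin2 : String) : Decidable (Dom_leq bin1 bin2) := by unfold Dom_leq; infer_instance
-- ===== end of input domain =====

-- B compares the strings length-first and then as binary NUMBERS (one full zip pass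
-- folding v = 2*v + bit, no early exit), instead of A's early-exit character scan.


-- ===== PORT A =====
-- A's while loop over index i, as structural recursion on the two character lists.
-- The '[], _' arms are where the Python loop runs off the end and bin2[i] raises
-- IndexError; those inputs are outside Pre_leq.
def leqLoop : List Char → List Char → Bool
  | a :: s, b :: t =>
      if a ≤ b then                       -- while bin2[i] >= bin1[i]
        if b = '1' ∧ a = '0' then true    -- if bin2[i]=="1" and bin1[i]=="0": return True
        else leqLoop s t                  -- i += 1
      else false                          -- loop exits: return False
  | _, _ => false                         -- IndexError in Python (excluded by Pre_leq)

def leq (bin1 : String) (bin2 : String) : Bool :=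
  if bin2.toList = bin1.toList then true
  else if bin1.toList.length < bin2.toList.length then true
  else if bin2.toList.length < bin1.toList.length then false
  else leqLoop bin1.toList bin2.toList

-- ===== PORT B =====
-- Python's (c == '1') used as the int 0/1
def bitv (c : Char) : Int := if c = '1' then 1 else 0

def leq_alt (bin1 : String) (bin2 : String) : Bool :=
  if bin1.toList.length ≠ bin2.toList.length then
    decide (bin1.toList.length < bin2.toList.length)
  else
    let p := (bin1.toList.zip bin2.toList).foldl
      (fun (vp : Int × Int) cc => (2 * vp.1 + bitv cc.1, 2 * vp.2 + bitv cc.2))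
      ((0 : Int), (0 : Int))
    decide (p.1 ≤ p.2)

-- ===== PRECONDITION & SPEC =====
def isBin (s : String) : Prop := s.toList.all (fun c => c == '0' || c == '1') = true

-- Pre_ admits equal strings, strings of different lengths, and genuinely binary strings;
-- it excludes equal-length unequal non-binary pairs, on which A's scan either raises
-- IndexError or returns a value driven by its literal '1'/'0' test while B compares
-- the (zero outside '1') numeric values.
def Pre_leq (bin1 : String) (bin2 : String) : Prop :=
  bin1.toList = bin2.toList ∨ bin1.toList.length ≠ bin2.toList.length ∨
    (isBin bin1 ∧ isBin bin2)
instance (bin1 : String) (bin2 : String) : Decidable (Pre_leq bin1 bin2) := by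
  unfold Pre_leq isBin; infer_instance

def pvWitness_leq : String × String := ("0110", "1010")

def Spec_leq (bin1 : String) (bin2 : String) (out : Bool) : Prop := out = leq_alt bin1 bin2
instance (bin1 : String) (bin2 : String) (out : Bool) : Decidable (Spec_leq bin1 bin2 out) := by
  unfold Spec_leq; infer_instance

-- ===== CLAIM (what is proved, stated in full; the proofs are below) =====
def Claim_equal_leq : Prop := ∀ (bin1 : String) (bin2 : String), Dom_leq bin1 bin2 → Pre_leq bin1 bin2 → Spec_leq bin1 bin2 (leq bin1 bin2)

-- ===== LEMMAS AND PROOFS =====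

-- the numeric value B accumulates, starting from acc
def valAcc (acc : Int) (l : List Char) : Int :=
  l.foldl (fun v c => 2 * v + bitv c) acc

def binL (l : List Char) : Prop := ∀ c ∈ l, c = '0' ∨ c = '1'

theorem zip_foldl_pair (l1 : List Char) : ∀ (l2 : List Char) (a1 a2 : Int),
    l1.length = l2.length →
    (l1.zip l2).foldl
      (fun (vp : Int × Int) cc => (2 * vp.1 + bitv cc.1, 2 * vp.2 + bitv cc.2)) (a1, a2)
      = (valAcc a1 l1, valAcc a2 l2) := by
  induction l1 with
  | nil => intro l2 a1 a2 h; cases l2 <;> simp_all [valAcc]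
  | cons a s ih =>
    intro l2 a1 a2 h
    cases l2 with
    | nil => simp at h
    | cons b t =>
      simp only [List.zip_cons_cons, List.foldl_cons, valAcc]
      exact ih t _ _ (by simpa using h)

theorem valAcc_shift (l : List Char) : ∀ acc : Int,
    valAcc acc l = acc * 2 ^ l.length + valAcc 0 l := by
  induction l with
  | nil => intro acc; simp [valAcc]
  | cons c s ih =>
    intro acc
    simp only [valAcc, List.foldl_cons] at *
    rw [ih (2 * acc + bitv c), ih (2 * 0 + bitv c)]
    simp only [List.length_cons, pow_succ]
    ring

theorem valAcc_cons (c : Char) (u : List Char) :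
    valAcc 0 (c :: u) = bitv c * 2 ^ u.length + valAcc 0 u := by
  simp only [valAcc, List.foldl_cons]
  rw [show (2 * 0 + bitv c : Int) = bitv c by ring]
  exact valAcc_shift u (bitv c)

theorem valAcc_bounds (l : List Char) (hb : binL l) :
    0 ≤ valAcc 0 l ∧ valAcc 0 l < 2 ^ l.length := by
  induction l with
  | nil => simp [valAcc]
  | cons c s ih =>
    have hs := ih (fun x hx => hb x (List.mem_cons_of_mem _ hx))
    rw [valAcc_cons, List.length_cons, pow_succ]
    rcases hb c (List.mem_cons_self) with h | h <;> rw [h]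
    · rw [show bitv '0' = 0 from rfl]
      constructor <;> linarith [hs.1, hs.2]
    · rw [show bitv '1' = 1 from rfl]
      constructor <;> linarith [hs.1, hs.2]

-- on equal-length unequal binary lists A's scan computes the numeric comparison
theorem leqLoop_eq_val (l1 : List Char) : ∀ l2 : List Char,
    l1.length = l2.length → binL l1 → binL l2 → l1 ≠ l2 →
    leqLoop l1 l2 = decide (valAcc 0 l1 ≤ valAcc 0 l2) := by
  induction l1 with
  | nil => intro l2 h _ _ hne; cases l2 <;> simp_all
  | cons a s ih =>
    intro l2 hlen hb1 hb2 hne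
    cases l2 with
    | nil => simp at hlen
    | cons b t =>
      have hlen' : s.length = t.length := by simpa using hlen
      have hs1 : binL s := fun x hx => hb1 x (List.mem_cons_of_mem _ hx)
      have ht2 : binL t := fun x hx => hb2 x (List.mem_cons_of_mem _ hx)
      have hbs := valAcc_bounds s hs1
      have hbt := valAcc_bounds t ht2
      rw [hlen'] at hbs
      rcases hb1 a (List.mem_cons_self) with ha | ha <;>
        rcases hb2 b (List.mem_cons_self) with hb | hb <;> subst ha <;> subst hb
      · -- a='0', b='0': loop advances; equal leading terms
        have hst : s ≠ t := fun h => hne (by rw [h])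
        have hloop : leqLoop ('0' :: s) ('0' :: t) = leqLoop s t := by
          show (if '0' ≤ '0' then if ('0' = '1' ∧ '0' = '0') then true else leqLoop s t
                else false) = leqLoop s t
          rw [if_pos (by decide), if_neg (by decide)]
        rw [hloop, ih t hlen' hs1 ht2 hst, valAcc_cons, valAcc_cons, hlen']
        rw [decide_eq_decide]
        constructor <;> intro h <;> linarith
      · -- a='0', b='1': A returns true; value side: vs < 2^n ≤ 2^n + vt
        have hloop : leqLoop ('0' :: s) ('1' :: t) = true := by
          show (if '0' ≤ '1' then if ('1' = '1' ∧ '0' = '0') then true else leqLoop s t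
                else false) = true
          rw [if_pos (by decide), if_pos (by decide)]
        rw [hloop, valAcc_cons, valAcc_cons, hlen']
        symm
        rw [decide_eq_true_eq, show bitv '0' = 0 from rfl, show bitv '1' = 1 from rfl]
        linarith [hbs.2, hbt.1]
      · -- a='1', b='0': the while guard fails at once; value side: vt < 2^n ≤ 2^n + vs
        have hloop : leqLoop ('1' :: s) ('0' :: t) = false := by
          show (if '1' ≤ '0' then if ('0' = '1' ∧ '1' = '0') then true else leqLoop s t
                else false) = false
          rw [if_neg (by decide)]
        rw [hloop, valAcc_cons, valAcc_cons, hlen']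
        symm
        rw [decide_eq_false_iff_not, not_le,
          show bitv '0' = 0 from rfl, show bitv '1' = 1 from rfl]
        linarith [hbs.1, hbt.2]
      · -- a='1', b='1': loop advances; equal leading terms
        have hst : s ≠ t := fun h => hne (by rw [h])
        have hloop : leqLoop ('1' :: s) ('1' :: t) = leqLoop s t := by
          show (if '1' ≤ '1' then if ('1' = '1' ∧ '1' = '0') then true else leqLoop s t
                else false) = leqLoop s t
          rw [if_pos (by decide), if_neg (by decide)]
        rw [hloop, ih t hlen' hs1 ht2 hst, valAcc_cons, valAcc_cons, hlen']
        rw [decide_eq_decide]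
        constructor <;> intro h <;> linarith

theorem isBin_binL (s : String) (h : isBin s) : binL s.toList := by
  intro c hc
  have := List.all_eq_true.mp h c hc
  simpa [or_comm] using (by simpa using this : c = '0' ∨ c = '1')

-- ===== VERDICT (by name: the statement is the Claim_ definition above) =====
theorem leq_spec : Claim_equal_leq := by
  intro bin1 bin2 _ hpre
  unfold Spec_leq leq leq_alt
  split_ifs with h1 h2 h3 h4 h5 h6 h7
  · exact absurd (by rw [h1]) h2
  · rw [zip_foldl_pair _ _ _ _ (by rw [h1]), h1]
    simp
  · symm; rw [decide_eq_true_eq]; exact h3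
  · exact absurd (by omega : bin1.toList.length ≠ bin2.toList.length) h4
  · symm; rw [decide_eq_false_iff_not]; omega
  · omega
  · exact absurd (by omega : ¬ bin1.toList.length ≠ bin2.toList.length) (fun h => h h7)
  · have hlen : bin1.toList.length = bin2.toList.length := by omega
    have hne1 : bin1.toList ≠ bin2.toList := fun h => h1 h.symm
    rcases hpre with h | h | ⟨hb1, hb2⟩
    · exact absurd h hne1
    · exact absurd hlen h
    · rw [zip_foldl_pair _ _ _ _ hlen]
      exact leqLoop_eq_val _ _ hlen (isBin_binL _ hb1) (isBin_binL _ hb2) hne1
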